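-- pv_equiv track=rewrite | github.com/rohan-joshi/dj_python | dj_mixer/advanced_transitions.py | _tracks_harmonically_compatible
-- ===== SOURCE A (Python) =====
-- def _tracks_harmonically_compatible(key1: str, key2: str) -> bool:
--     """Check if tracks are harmonically compatible using Camelot wheel"""
--     # Simplified harmonic compatibility check
--     if key1 == key2:
--         return True
--
--     # Major/minor relationships
--     major_minor_pairs = [
--         ('C', 'Am'), ('G', 'Em'), ('D', 'Bm'), ('A', 'F#m'),
--         ('E', 'C#m'), ('B', 'G#m'), ('F#', 'D#m'), ('Db', 'Bbm'),
--         ('Ab', 'Fm'), ('Eb', 'Cm'), ('Bb', 'Gm'), ('F', 'Dm')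
--     ]
--
--     for major, minor in major_minor_pairs:
--         if (key1 == major and key2 == minor) or (key1 == minor and key2 == major):
--             return True
--
--     # Perfect fifth relationships (basic check)
--     fifth_relationships = [
--         ('C', 'G'), ('G', 'D'), ('D', 'A'), ('A', 'E'),
--         ('E', 'B'), ('B', 'F#'), ('F#', 'Db'), ('Db', 'Ab'),
--         ('Ab', 'Eb'), ('Eb', 'Bb'), ('Bb', 'F'), ('F', 'C')
--     ]
--
--     for key_a, key_b in fifth_relationships:
--         if (key1 == key_a and key2 == key_b) or (key1 == key_b and key2 == key_a):
--             return True
--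
--     return False
-- ===== SOURCE B (Python) =====
-- # Camelot-style lookup: position on the circle of fifths + mode, then arithmetic.
-- _MAJORS = ['C', 'G', 'D', 'A', 'E', 'B', 'F#', 'Db', 'Ab', 'Eb', 'Bb', 'F']
-- _MINORS = ['Am', 'Em', 'Bm', 'F#m', 'C#m', 'G#m', 'D#m', 'Bbm', 'Fm', 'Cm', 'Gm', 'Dm']
-- CAMELOT = {}
-- for _i, _k in enumerate(_MAJORS):
--     CAMELOT[_k] = (_i, True)
-- for _i, _k in enumerate(_MINORS):
--     CAMELOT[_k] = (_i, False)
--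
--
-- def _tracks_harmonically_compatible(key1: str, key2: str) -> bool:
--     if key1 == key2:
--         return True
--     p1 = CAMELOT.get(key1)
--     p2 = CAMELOT.get(key2)
--     if p1 is None or p2 is None:
--         return False
--     n1, maj1 = p1
--     n2, maj2 = p2
--     if n1 == n2:
--         return True  # relative major/minor
--     return maj1 and maj2 and (n1 - n2) % 12 in (1, 11)
-- ===== Notes on version B (the rewrite author's own statement) =====
-- stated objective: alternative
-- what changed: Replaced the two literal pair-lists and their linear scans with a dict mapping each key to its circle-of-fifths position and mode; compatibility becomes equal positions (relative major/minor) or two majors at circularly adjacent positions ((n1-n2) % 12 in (1,11)).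
import Mathlib
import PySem

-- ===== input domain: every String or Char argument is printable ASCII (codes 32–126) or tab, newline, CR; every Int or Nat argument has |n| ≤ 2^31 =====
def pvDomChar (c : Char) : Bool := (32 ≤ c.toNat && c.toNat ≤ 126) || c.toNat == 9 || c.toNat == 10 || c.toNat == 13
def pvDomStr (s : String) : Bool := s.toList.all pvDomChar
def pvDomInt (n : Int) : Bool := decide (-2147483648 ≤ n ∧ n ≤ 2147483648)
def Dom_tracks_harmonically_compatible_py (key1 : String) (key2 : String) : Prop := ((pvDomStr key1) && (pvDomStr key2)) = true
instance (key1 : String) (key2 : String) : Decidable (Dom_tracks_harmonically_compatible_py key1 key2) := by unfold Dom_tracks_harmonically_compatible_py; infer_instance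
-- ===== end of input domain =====

-- B replaces A's two literal pair-lists and their scans with one circle-of-fifths
-- position lookup plus modular arithmetic (objective: idiomatic/alternative).

-- ===== PORT A =====
def pvMajorMinorPairs : List (String × String) :=
  [("C", "Am"), ("G", "Em"), ("D", "Bm"), ("A", "F#m"),
   ("E", "C#m"), ("B", "G#m"), ("F#", "D#m"), ("Db", "Bbm"),
   ("Ab", "Fm"), ("Eb", "Cm"), ("Bb", "Gm"), ("F", "Dm")]

def pvFifthRelationships : List (String × String) :=
  [("C", "G"), ("G", "D"), ("D", "A"), ("A", "E"),
   ("E", "B"), ("B", "F#"), ("F#", "Db"), ("Db", "Ab"),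
   ("Ab", "Eb"), ("Eb", "Bb"), ("Bb", "F"), ("F", "C")]

def tracks_harmonically_compatible_py (key1 : String) (key2 : String) : Bool :=
  if key1 == key2 then true
  else if pvMajorMinorPairs.any (fun p => (key1 == p.1 && key2 == p.2) || (key1 == p.2 && key2 == p.1)) then true
  else if pvFifthRelationships.any (fun p => (key1 == p.1 && key2 == p.2) || (key1 == p.2 && key2 == p.1)) then true
  else false

-- ===== PORT B =====
def pvMajors : List String := ["C", "G", "D", "A", "E", "B", "F#", "Db", "Ab", "Eb", "Bb", "F"]
def pvMinors : List String := ["Am", "Em", "Bm", "F#m", "C#m", "G#m", "D#m", "Bbm", "Fm", "Cm", "Gm", "Dm"]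

def pvCamelot : PySem.Dict String (Int × Bool) :=
  (PySem.List.enumerate pvMinors).foldl (fun d p => d.insert p.2 (p.1, false))
    ((PySem.List.enumerate pvMajors).foldl (fun d p => d.insert p.2 (p.1, true)) PySem.Dict.empty)

def tracks_harmonically_compatible_py_alt (key1 : String) (key2 : String) : Bool :=
  if key1 == key2 then true
  else
    match pvCamelot.get? key1, pvCamelot.get? key2 with
    | some (n1, maj1), some (n2, maj2) =>
        if n1 == n2 then true  -- relative major/minor
        else maj1 && maj2 &&
          (PySem.Int.mod (n1 - n2) 12 == 1 || PySem.Int.mod (n1 - n2) 12 == 11)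
    | _, _ => false

-- ===== PRECONDITION & SPEC =====
def Spec_tracks_harmonically_compatible_py (key1 : String) (key2 : String) (out : Bool) : Prop := out = tracks_harmonically_compatible_py_alt key1 key2
instance (key1 : String) (key2 : String) (out : Bool) : Decidable (Spec_tracks_harmonically_compatible_py key1 key2 out) := by unfold Spec_tracks_harmonically_compatible_py; infer_instance

-- ===== CLAIM (what is proved, stated in full; the proofs are below) =====
def Claim_equal_tracks_harmonically_compatible_py : Prop := ∀ (key1 : String) (key2 : String), Dom_tracks_harmonically_compatible_py key1 key2 → Spec_tracks_harmonically_compatible_py key1 key2 (tracks_harmonically_compatible_py key1 key2)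

-- ===== LEMMAS AND PROOFS =====

-- the 24 key names either program ever recognises
def pvKeys : List String := pvMajors ++ pvMinors

lemma pvA_unknown (k1 k2 : String) (h : k1 ∉ pvKeys ∨ k2 ∉ pvKeys) (e : k1 ≠ k2) :
    tracks_harmonically_compatible_py k1 k2 = false := by
  rcases h with h | h <;>
  · simp only [pvKeys, pvMajors, pvMinors, List.mem_append, List.mem_cons,
      List.not_mem_nil, or_false, not_or] at h
    obtain ⟨⟨h1,h2,h3,h4,h5,h6,h7,h8,h9,h10,h11,h12⟩,
            h13,h14,h15,h16,h17,h18,h19,h20,h21,h22,h23,h24⟩ := h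
    simp [tracks_harmonically_compatible_py, pvMajorMinorPairs, pvFifthRelationships,
      e, h1,h2,h3,h4,h5,h6,h7,h8,h9,h10,h11,h12,h13,h14,h15,h16,h17,h18,h19,h20,h21,h22,h23,h24]

lemma pvCamelot_get?_unknown (k : String) (h : k ∉ pvKeys) : pvCamelot.get? k = none := by
  simp only [pvKeys, pvMajors, pvMinors, List.mem_append, List.mem_cons,
    List.not_mem_nil, or_false, not_or] at h
  obtain ⟨⟨h1,h2,h3,h4,h5,h6,h7,h8,h9,h10,h11,h12⟩,
          h13,h14,h15,h16,h17,h18,h19,h20,h21,h22,h23,h24⟩ := h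
  have hc : pvCamelot = PySem.Dict.mk
      [("C", (0, true)), ("G", (1, true)), ("D", (2, true)), ("A", (3, true)),
       ("E", (4, true)), ("B", (5, true)), ("F#", (6, true)), ("Db", (7, true)),
       ("Ab", (8, true)), ("Eb", (9, true)), ("Bb", (10, true)), ("F", (11, true)),
       ("Am", (0, false)), ("Em", (1, false)), ("Bm", (2, false)), ("F#m", (3, false)),
       ("C#m", (4, false)), ("G#m", (5, false)), ("D#m", (6, false)), ("Bbm", (7, false)),
       ("Fm", (8, false)), ("Cm", (9, false)), ("Gm", (10, false)), ("Dm", (11, false))] := by decide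
  rw [hc]
  simp [h1,h2,h3,h4,h5,h6,h7,h8,h9,h10,h11,h12,
    h13,h14,h15,h16,h17,h18,h19,h20,h21,h22,h23,h24, Ne.symm, PySem.Dict.get?]

lemma pvB_unknown (k1 k2 : String) (h : k1 ∉ pvKeys ∨ k2 ∉ pvKeys) (e : k1 ≠ k2) :
    tracks_harmonically_compatible_py_alt k1 k2 = false := by
  unfold tracks_harmonically_compatible_py_alt
  rcases h with h | h <;> rw [pvCamelot_get?_unknown _ h]
  · rcases pvCamelot.get? k2 with _ | ⟨n, b⟩ <;> simp [e]
  · rcases pvCamelot.get? k1 with _ | ⟨n, b⟩ <;> simp [e]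

-- ===== VERDICT (by name: the statement is the Claim_ definition above) =====
theorem tracks_harmonically_compatible_py_spec : Claim_equal_tracks_harmonically_compatible_py := by
  intro k1 k2 _
  unfold Spec_tracks_harmonically_compatible_py
  by_cases e : k1 = k2
  · subst e; simp [tracks_harmonically_compatible_py, tracks_harmonically_compatible_py_alt]
  · by_cases h1 : k1 ∈ pvKeys
    · by_cases h2 : k2 ∈ pvKeys
      · simp only [pvKeys, pvMajors, pvMinors, List.mem_append, List.mem_cons,
          List.not_mem_nil, or_false] at h1 h2
        rcases h1 with (rfl|rfl|rfl|rfl|rfl|rfl|rfl|rfl|rfl|rfl|rfl|rfl)|rfl|rfl|rfl|rfl|rfl|rfl|rfl|rfl|rfl|rfl|rfl|rfl <;>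
          rcases h2 with (rfl|rfl|rfl|rfl|rfl|rfl|rfl|rfl|rfl|rfl|rfl|rfl)|rfl|rfl|rfl|rfl|rfl|rfl|rfl|rfl|rfl|rfl|rfl|rfl <;>
          first
          | exact absurd rfl e
          | decide
      · rw [pvA_unknown _ _ (Or.inr h2) e, pvB_unknown _ _ (Or.inr h2) e]
    · rw [pvA_unknown _ _ (Or.inl h1) e, pvB_unknown _ _ (Or.inl h1) e]
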